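-- pv_equiv track=rewrite | github.com/danielrmendonca/IP-UFPE | Lista 5/lista5-4.py | formatar_senha
-- ===== SOURCE A (Python) =====
-- def formatar_senha(lista, indice=0, senha=""):
--     if indice >= len(lista):
--         if len(senha) >= 4:
--             return senha
--         else:
--             return
--
--     numero_formatado = str(abs(lista[indice])).replace("0", "")
--     return formatar_senha (lista, indice+1, senha+numero_formatado)
-- ===== SOURCE B (Python) =====
-- def formatar_senha(lista, indice=0, senha=""):
--     for i in range(indice, len(lista)):
--         senha += str(abs(lista[i])).replace("0", "")
--     return senha if len(senha) >= 4 else None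
-- ===== Notes on version B (the rewrite author's own statement) =====
-- stated objective: faster
-- what changed: Replaces A's tail recursion with a single explicit for-loop over range(indice, len(lista)) that threads the accumulator via '+=' (in-place string build, no recursion frames), followed by one final length test.
import Mathlib
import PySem

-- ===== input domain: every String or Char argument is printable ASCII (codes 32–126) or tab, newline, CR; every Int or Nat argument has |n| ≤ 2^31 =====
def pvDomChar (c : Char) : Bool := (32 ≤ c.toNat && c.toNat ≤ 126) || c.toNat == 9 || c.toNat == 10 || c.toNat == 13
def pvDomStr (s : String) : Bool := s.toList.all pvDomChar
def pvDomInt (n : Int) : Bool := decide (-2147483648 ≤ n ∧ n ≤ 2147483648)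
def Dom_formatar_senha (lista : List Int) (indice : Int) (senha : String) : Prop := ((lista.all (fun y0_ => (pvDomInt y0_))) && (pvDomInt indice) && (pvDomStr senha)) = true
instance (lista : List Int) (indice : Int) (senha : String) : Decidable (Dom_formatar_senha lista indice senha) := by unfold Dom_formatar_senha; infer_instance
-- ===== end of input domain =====

-- B replaces A's tail recursion by a single explicit for-loop threading the accumulator (simpler; same O(n) cost).

-- ===== PORT A =====
-- str(abs(x)).replace("0", "")
def pvFmtNum (x : Int) : String := PySem.Str.replace (PySem.Int.toStr |x|) "0" ""

def formatar_senha (lista : List Int) (indice : Int) (senha : String) : Option String :=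
  if (lista.length : Int) ≤ indice then
    if 4 ≤ PySem.Str.len senha then some senha else none
  else
    match PySem.List.pyGet? lista indice with
    | none => none   -- IndexError (indice < -len); excluded by Pre_
    | some x => formatar_senha lista (indice + 1) (senha ++ pvFmtNum x)
termination_by ((lista.length : Int) - indice).toNat
decreasing_by omega

-- ===== PORT B =====
def formatar_senha_alt (lista : List Int) (indice : Int) (senha : String) : Option String :=
  let r := (PySem.List.pyRange indice lista.length 1).foldl
    (fun acc i => acc.bind fun s =>
      (PySem.List.pyGet? lista i).map (fun x => s ++ pvFmtNum x))
    (some senha)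
  match r with
  | none => none   -- IndexError inside the loop; excluded by Pre_
  | some s => if 4 ≤ PySem.Str.len s then some s else none

-- ===== PRECONDITION & SPEC =====
-- A (and B) raise IndexError exactly when indice < -len(lista); Pre_ excludes exactly those inputs.
def Pre_formatar_senha (lista : List Int) (indice : Int) (senha : String) : Prop :=
  -(lista.length : Int) ≤ indice
instance (lista : List Int) (indice : Int) (senha : String) : Decidable (Pre_formatar_senha lista indice senha) := by unfold Pre_formatar_senha; infer_instance

def pvWitness_formatar_senha : List Int × Int × String := ([10, 203, 4], 0, "")

def Spec_formatar_senha (lista : List Int) (indice : Int) (senha : String) (out : Option String) : Prop := out = formatar_senha_alt lista indice senha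
instance (lista : List Int) (indice : Int) (senha : String) (out : Option String) : Decidable (Spec_formatar_senha lista indice senha out) := by unfold Spec_formatar_senha; infer_instance

-- ===== CLAIM (what is proved, stated in full; the proofs are below) =====
def Claim_equal_formatar_senha : Prop := ∀ (lista : List Int) (indice : Int) (senha : String), Dom_formatar_senha lista indice senha → Pre_formatar_senha lista indice senha → Spec_formatar_senha lista indice senha (formatar_senha lista indice senha)

-- ===== LEMMAS AND PROOFS =====
theorem formatar_senha_key (lista : List Int) :
    ∀ (n : Nat) (indice : Int) (senha : String),
      ((lista.length : Int) - indice).toNat ≤ n →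
      -(lista.length : Int) ≤ indice →
      formatar_senha lista indice senha = formatar_senha_alt lista indice senha := by
  intro n
  induction n with
  | zero =>
    intro indice senha hn _
    have hge : (lista.length : Int) ≤ indice := by omega
    rw [formatar_senha, if_pos hge]
    unfold formatar_senha_alt
    rw [PySem.List.pyRange_one_eq_nil (by simpa using hge)]
    simp
  | succ n ih =>
    intro indice senha hn hlo
    by_cases hge : (lista.length : Int) ≤ indice
    · rw [formatar_senha, if_pos hge]
      unfold formatar_senha_alt
      rw [PySem.List.pyRange_one_eq_nil (by simpa using hge)]
      simp
    · have hlt : indice < (lista.length : Int) := by omega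
      obtain ⟨x, hx⟩ : ∃ x, PySem.List.pyGet? lista indice = some x := by
        cases hget : PySem.List.pyGet? lista indice with
        | none =>
          exfalso
          have := (PySem.List.pyGet?_eq_none_iff (xs := lista) (i := indice)).mp hget
          exact this ⟨by simpa using hlo, by simpa using hlt⟩
        | some x => exact ⟨x, rfl⟩
      rw [formatar_senha, if_neg hge, hx]
      show formatar_senha lista (indice + 1) (senha ++ pvFmtNum x) = formatar_senha_alt lista indice senha
      rw [ih (indice + 1) (senha ++ pvFmtNum x) (by omega) (by omega)]
      unfold formatar_senha_alt
      have hc := PySem.List.pyRange_one_cons (a := indice) (b := (lista.length : Int)) (by simpa using hlt)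
      conv_rhs => rw [hc]
      simp only [List.foldl_cons, hx, Option.map_some]
      rfl

-- ===== VERDICT (by name: the statement is the Claim_ definition above) =====
theorem formatar_senha_spec : Claim_equal_formatar_senha := by
  intro lista indice senha _ hpre
  unfold Spec_formatar_senha
  exact formatar_senha_key lista ((lista.length : Int) - indice).toNat indice senha le_rfl hpre
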